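-- pv_equiv track=rewrite | github.com/TomJSoftwire/advent-of-code-2021 | 04/sol2.py | boardWin
-- ===== SOURCE A (Python) =====
-- def boardWin(rows, nums):
--     columns = []
--     length = len(rows[0])
--     for i in range(0,length):
--         column = []
--         for row in rows:
--             column.append(row[i])
--         columns.append(column)
--     options = rows + columns
--     completeLines = []
--
--     for line in options:
--         def isReadOut(lineNums, readOutNums):
--             for num in lineNums:
--                 if num not in readOutNums:
--                     return False
--             return True
--
--         if isReadOut(line, nums):
--             completeLines.append(line)
--     return completeLines
-- ===== SOURCE B (Python) =====
-- def boardWin(rows, nums):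
--     width = len(rows[0])
--     drawn = set(nums)
--     col_cnt = [0] * width
--     complete_rows = []
--     for row in rows:
--         cnt = 0
--         for j, x in enumerate(row):
--             if x in drawn:
--                 cnt += 1
--                 if j < width:
--                     col_cnt[j] += 1
--         if cnt == len(row):
--             complete_rows.append(row)
--     out = list(complete_rows)
--     for j in range(width):
--         if col_cnt[j] == len(rows):
--             out.append([row[j] for row in rows])
--     return out
-- ===== Notes on version B (the rewrite author's own statement) =====
-- stated objective: alternative
-- what changed: Instead of materialising every line (rows plus transposed columns) and running an all-membership scan of nums per line, B builds the drawn set once and makes a single pass over the grid maintaining a per-row and a per-column counter of drawn cells; a line is complete iff its counter equals its length, and only complete column lists are reconstructed.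
import Mathlib
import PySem

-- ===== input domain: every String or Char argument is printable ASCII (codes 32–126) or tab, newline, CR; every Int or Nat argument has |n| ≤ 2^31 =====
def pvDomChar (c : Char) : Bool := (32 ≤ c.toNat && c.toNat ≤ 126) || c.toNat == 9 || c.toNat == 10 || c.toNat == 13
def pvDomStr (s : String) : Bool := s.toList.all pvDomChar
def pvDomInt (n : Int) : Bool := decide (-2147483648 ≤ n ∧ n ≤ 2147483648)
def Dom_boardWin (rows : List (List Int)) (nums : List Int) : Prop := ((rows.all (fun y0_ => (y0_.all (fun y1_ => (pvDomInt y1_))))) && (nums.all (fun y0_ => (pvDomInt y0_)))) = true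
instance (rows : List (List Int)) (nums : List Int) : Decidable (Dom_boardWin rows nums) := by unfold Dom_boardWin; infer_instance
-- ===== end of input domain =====

-- B replaces A's build-every-line + per-line membership scan by one pass over the grid
-- maintaining per-row/per-column counters of drawn cells (objective: alternative decomposition).


-- ===== PORT A =====
def boardWin (rows : List (List Int)) (nums : List Int) : List (List Int) :=
  -- len(rows[0]): Pre_ guarantees rows ≠ [], so headD [] is rows[0]
  let length := (rows.headD []).length
  -- row[i]: exact as row.getD i 0, since Pre_ guarantees i < length ≤ len(row)
  let columns := (List.range length).foldl
    (fun cols i => cols ++ [rows.foldl (fun col row => col ++ [row.getD i 0]) []]) []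
  let options := rows ++ columns
  -- isReadOut(line, nums): the early-return membership loop is line.all (· ∈ nums)
  options.foldl (fun acc line =>
    if line.all (fun num => decide (num ∈ nums)) then acc ++ [line] else acc) []

-- ===== PORT B =====
-- the body of B's inner 'for j, x in enumerate(row)' loop (state: (cnt, col_cnt))
def bwStep (drawn : List Int) (width : Nat) (p : Nat × List Nat) (xj : Int × Nat) : Nat × List Nat :=
  if xj.1 ∈ drawn then
    (p.1 + 1, if xj.2 < width then p.2.set xj.2 (p.2.getD xj.2 0 + 1) else p.2)
  else p

-- B's inner loop; enumerate(row) ported as List.zipIdx (the positions 0..len(row)-1, exact)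
def bwRow (drawn : List Int) (width : Nat) (col : List Nat) (row : List Int) : Nat × List Nat :=
  row.zipIdx.foldl (bwStep drawn width) (0, col)

def boardWin_alt (rows : List (List Int)) (nums : List Int) : List (List Int) :=
  let width := (rows.headD []).length
  let drawn := PySem.Set.ofList nums
  -- one pass over the rows: state = (col_cnt, complete_rows)
  let st := rows.foldl (fun (st : List Nat × List (List Int)) row =>
      let r := bwRow drawn width st.1 row
      (r.2, if r.1 = row.length then st.2 ++ [row] else st.2))
    (List.replicate width 0, [])
  -- out = complete_rows, then every column whose counter equals the number of rows
  (List.range width).foldl (fun out j =>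
    if st.1.getD j 0 = rows.length then out ++ [rows.map (fun row => row.getD j 0)] else out)
    st.2

-- ===== PRECONDITION & SPEC =====
-- Pre_ excludes exactly the inputs on which A raises IndexError: empty rows (len(rows[0]))
-- and ragged boards where some row is shorter than the first row (row[i]).
def Pre_boardWin (rows : List (List Int)) (nums : List Int) : Prop :=
  rows ≠ [] ∧ ∀ row ∈ rows, (rows.headD []).length ≤ row.length
instance (rows : List (List Int)) (nums : List Int) : Decidable (Pre_boardWin rows nums) := by
  unfold Pre_boardWin; infer_instance

def pvWitness_boardWin : List (List Int) × List Int := ([[1, 2], [3, 4]], [1, 2, 3])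

def Spec_boardWin (rows : List (List Int)) (nums : List Int) (out : List (List Int)) : Prop := out = boardWin_alt rows nums
instance (rows : List (List Int)) (nums : List Int) (out : List (List Int)) : Decidable (Spec_boardWin rows nums out) := by unfold Spec_boardWin; infer_instance

-- ===== CLAIM (what is proved, stated in full; the proofs are below) =====
def Claim_equal_boardWin : Prop := ∀ (rows : List (List Int)) (nums : List Int), Dom_boardWin rows nums → Pre_boardWin rows nums → Spec_boardWin rows nums (boardWin rows nums)

-- ===== LEMMAS AND PROOFS =====

-- 'does the cell (x at absolute position k) hit column j?'
def bwHit (drawn : List Int) (j : Nat) (xj : Int × Nat) : Bool := decide (xj.2 = j ∧ xj.1 ∈ drawn)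

theorem bw_foldl_append_dite {α β : Type} (p : α → Prop) [DecidablePred p] (f : α → β) :
    ∀ (l : List α) (acc : List β),
      l.foldl (fun a x => if p x then a ++ [f x] else a) acc
        = acc ++ (l.filter (fun x => decide (p x))).map f := by
  intro l
  induction l with
  | nil => simp
  | cons x xs ih =>
    intro acc
    by_cases hx : p x <;> simp [hx, ih]

theorem bwHit_count_lt (drawn : List Int) :
    ∀ (xs : List Int) (k j : Nat), j < k → (xs.zipIdx k).countP (bwHit drawn j) = 0 := by
  intro xs
  induction xs with
  | nil => simp
  | cons x xs ih =>
    intro k j hj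
    rw [List.zipIdx_cons, List.countP_cons]
    have h1 : bwHit drawn j (x, k) = false := by simp [bwHit]; omega
    rw [ih (k + 1) j (by omega)]
    simp [h1]

theorem bwHit_count (drawn : List Int) :
    ∀ (xs : List Int) (k j : Nat), j < xs.length →
      (xs.zipIdx k).countP (bwHit drawn (k + j))
        = if xs.getD j 0 ∈ drawn then 1 else 0 := by
  intro xs
  induction xs with
  | nil => intro k j hj; simp at hj
  | cons x xs ih =>
    intro k j hj
    rw [List.zipIdx_cons, List.countP_cons]
    cases j with
    | zero =>
      have h0 : (xs.zipIdx (k + 1)).countP (bwHit drawn (k + 0)) = 0 :=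
        bwHit_count_lt drawn xs (k + 1) (k + 0) (by omega)
      rw [h0]
      by_cases hx : x ∈ drawn <;> simp [bwHit, hx]
    | succ j' =>
      have h1 : bwHit drawn (k + (j' + 1)) (x, k) = false := by simp [bwHit]
      have h2 : k + (j' + 1) = (k + 1) + j' := by omega
      rw [h1, h2, ih (k + 1) j' (by simpa using hj)]
      simp

theorem bwRow_go (drawn : List Int) (width : Nat) :
    ∀ (row : List Int) (k c : Nat) (col : List Nat), col.length = width →
      ((row.zipIdx k).foldl (bwStep drawn width) (c, col)).1
          = c + row.countP (fun x => decide (x ∈ drawn))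
      ∧ ((row.zipIdx k).foldl (bwStep drawn width) (c, col)).2.length = width
      ∧ ∀ j, j < width →
          ((row.zipIdx k).foldl (bwStep drawn width) (c, col)).2.getD j 0
            = col.getD j 0 + (row.zipIdx k).countP (bwHit drawn j) := by
  intro row
  induction row with
  | nil => intro k c col h; exact ⟨by simp, by simpa using h, fun j _ => by simp⟩
  | cons x xs ih =>
    intro k c col h
    rw [List.zipIdx_cons]
    simp only [List.foldl_cons]
    by_cases hx : x ∈ drawn
    · have hstep : bwStep drawn width (c, col) (x, k)
          = (c + 1, if k < width then col.set k (col.getD k 0 + 1) else col) := by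
        simp [bwStep, hx]
      rw [hstep]
      by_cases hk : k < width
      · simp only [if_pos hk]
        have hlen : (col.set k (col.getD k 0 + 1)).length = width := by simp [h]
        obtain ⟨ih1, ih2, ih3⟩ := ih (k + 1) (c + 1) _ hlen
        refine ⟨?_, ih2, ?_⟩
        · rw [ih1, List.countP_cons]; simp [hx]; omega
        · intro j hj
          rw [ih3 j hj, List.countP_cons]
          by_cases hjk : k = j
          · subst hjk
            have hget : (col.set k (col.getD k 0 + 1)).getD k 0 = col.getD k 0 + 1 := by
              simp [List.getD, h, hk]
            rw [hget]
            simp [bwHit, hx]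
            omega
          · have hget : (col.set k (col.getD k 0 + 1)).getD j 0 = col.getD j 0 := by
              simp [List.getD, hjk]
            rw [hget]
            have : bwHit drawn j (x, k) = false := by simp [bwHit]; tauto
            simp [this]
      · simp only [if_neg hk]
        obtain ⟨ih1, ih2, ih3⟩ := ih (k + 1) (c + 1) col h
        refine ⟨?_, ih2, ?_⟩
        · rw [ih1, List.countP_cons]; simp [hx]; omega
        · intro j hj
          rw [ih3 j hj, List.countP_cons]
          have : bwHit drawn j (x, k) = false := by simp [bwHit]; intro hkj; omega
          simp [this]
    · have hstep : bwStep drawn width (c, col) (x, k) = (c, col) := by simp [bwStep, hx]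
      rw [hstep]
      obtain ⟨ih1, ih2, ih3⟩ := ih (k + 1) c col h
      refine ⟨?_, ih2, ?_⟩
      · rw [ih1, List.countP_cons]; simp [hx]
      · intro j hj
        rw [ih3 j hj, List.countP_cons]
        have : bwHit drawn j (x, k) = false := by simp [bwHit]; tauto
        simp [this]

theorem bwOuter (drawn : List Int) (width : Nat) :
    ∀ (rs : List (List Int)) (col : List Nat) (acc : List (List Int)),
      col.length = width → (∀ row ∈ rs, width ≤ row.length) →
      (rs.foldl (fun (st : List Nat × List (List Int)) row =>
          let r := bwRow drawn width st.1 row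
          (r.2, if r.1 = row.length then st.2 ++ [row] else st.2)) (col, acc)).2
        = acc ++ rs.filter (fun row => decide (row.countP (fun x => decide (x ∈ drawn)) = row.length))
      ∧ (rs.foldl (fun (st : List Nat × List (List Int)) row =>
          let r := bwRow drawn width st.1 row
          (r.2, if r.1 = row.length then st.2 ++ [row] else st.2)) (col, acc)).1.length = width
      ∧ ∀ j, j < width →
          (rs.foldl (fun (st : List Nat × List (List Int)) row =>
            let r := bwRow drawn width st.1 row
            (r.2, if r.1 = row.length then st.2 ++ [row] else st.2)) (col, acc)).1.getD j 0
          = col.getD j 0 + rs.countP (fun row => decide (row.getD j 0 ∈ drawn)) := by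
  intro rs
  induction rs with
  | nil => intro col acc h _; exact ⟨by simp, by simpa using h, fun j _ => by simp⟩
  | cons row rs ih =>
    intro col acc h hlen
    simp only [List.foldl_cons]
    obtain ⟨g1, g2, g3⟩ := bwRow_go drawn width row 0 0 col h
    have hrow : bwRow drawn width col row
        = ((row.zipIdx 0).foldl (bwStep drawn width) (0, col)) := rfl
    obtain ⟨ih1, ih2, ih3⟩ := ih ((bwRow drawn width col row).2)
      (if (bwRow drawn width col row).1 = row.length then acc ++ [row] else acc)
      (by rw [hrow]; exact g2) (fun r hr => hlen r (List.mem_cons_of_mem _ hr))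
    refine ⟨?_, ih2, ?_⟩
    · rw [ih1, List.filter_cons]
      have hc : (bwRow drawn width col row).1 = row.countP (fun x => decide (x ∈ drawn)) := by
        rw [hrow, g1]; omega
      by_cases hcond : row.countP (fun x => decide (x ∈ drawn)) = row.length
      · simp [hc, hcond]
      · simp [hc, hcond]
    · intro j hj
      rw [ih3 j hj, List.countP_cons]
      have hwr : width ≤ row.length := hlen row List.mem_cons_self
      have hg : (bwRow drawn width col row).2.getD j 0
          = col.getD j 0 + (if row.getD j 0 ∈ drawn then 1 else 0) := by
        rw [hrow, g3 j hj]
        have := bwHit_count drawn row 0 j (by omega)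
        simpa using this
      rw [hg]
      by_cases hd : row.getD j 0 ∈ drawn <;> simp <;> omega

-- A in normal form: filter the all-drawn lines out of rows ++ columns
theorem boardWin_eq (rows : List (List Int)) (nums : List Int) :
    boardWin rows nums
      = (rows ++ (List.range (rows.headD []).length).map
            (fun i => rows.map (fun row => row.getD i 0))).filter
          (fun line => line.all (fun num => decide (num ∈ nums))) := by
  simp only [boardWin]
  rw [PySem.List.foldl_append_if_eq_filter]
  simp only [List.nil_append]
  congr 1
  rw [PySem.List.foldl_append_singleton_eq_map]
  simp only [List.nil_append]
  congr 1
  apply List.map_congr_left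
  intro i _
  rw [PySem.List.foldl_append_singleton_eq_map]
  simp

-- ===== VERDICT (by name: the statement is the Claim_ definition above) =====
theorem boardWin_spec : Claim_equal_boardWin := by
  intro rows nums _ hpre
  obtain ⟨hne, hlen⟩ := hpre
  unfold Spec_boardWin
  set width := (rows.headD []).length with hw
  set drawn := PySem.Set.ofList nums with hd
  obtain ⟨o1, o2, o3⟩ := bwOuter drawn width rows (List.replicate width 0) []
    (by simp) (fun r hr => hlen r hr)
  rw [boardWin_eq]
  simp only [boardWin_alt, ← hw, ← hd]
  rw [bw_foldl_append_dite
      (fun j => ((rows.foldl (fun (st : List Nat × List (List Int)) row =>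
          let r := bwRow drawn width st.1 row
          (r.2, if r.1 = row.length then st.2 ++ [row] else st.2))
          (List.replicate width 0, [])).1.getD j 0 = rows.length))
      (fun j => rows.map (fun row => row.getD j 0))]
  rw [o1, List.nil_append, List.filter_append, List.filter_map]
  congr 1
  · apply List.filter_congr
    intro row hrow
    rw [Bool.eq_iff_iff]
    simp only [List.all_eq_true, decide_eq_true_eq, List.countP_eq_length]
    constructor
    · intro hall x hx
      simpa [hd, PySem.Set.mem_ofList] using hall x hx
    · intro hall x hx
      simpa [hd, PySem.Set.mem_ofList] using hall x hx
  · congr 1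
    apply List.filter_congr
    intro j hj
    have hjw : j < width := List.mem_range.mp hj
    have h3 := o3 j hjw
    have hrep : (List.replicate width (0 : Nat)).getD j 0 = 0 := by
      simp [List.getD, hjw]
    rw [h3, hrep]
    rw [Bool.eq_iff_iff]
    simp only [List.all_map, List.all_eq_true, Function.comp,
      decide_eq_true_eq, Nat.zero_add, List.countP_eq_length]
    constructor
    · intro hall row hrow
      simpa [hd, PySem.Set.mem_ofList] using hall row hrow
    · intro hall row hrow
      simpa [hd, PySem.Set.mem_ofList] using hall row hrow
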